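-- pv_equiv track=rewrite | github.com/sandeepchahal/Learning | DS/GeeksForGeeks/binarySearch/no_of_bouquet.py | noOfDays
-- ===== SOURCE A (Python) =====
-- def noOfDays(arr,days,k):
--     counter =0
--     total =0
--     for i in arr:
--         if i<=days:
--             counter+=1
--         else:
--             total += counter//k
--             counter = 0
--
--     total += counter//k
--     return total
-- ===== SOURCE B (Python) =====
-- def noOfDays(arr, days, k):
--     # segment-then-divide: collect lengths of maximal blooming runs, then sum len//k
--     runs = []
--     i, n = 0, len(arr)
--     while i < n:
--         if arr[i] <= days:
--             j = i
--             while j < n and arr[j] <= days: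
--                 j += 1
--             runs.append(j - i)
--             i = j
--         else:
--             i += 1
--     return sum(r // k for r in runs)
-- ===== Notes on version B (the rewrite author's own statement) =====
-- stated objective: alternative
-- what changed: Replaces the flush-and-reset running counter with a two-phase segment scan: first collect the lengths of the maximal blooming runs, then sum length//k over them.
import Mathlib
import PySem

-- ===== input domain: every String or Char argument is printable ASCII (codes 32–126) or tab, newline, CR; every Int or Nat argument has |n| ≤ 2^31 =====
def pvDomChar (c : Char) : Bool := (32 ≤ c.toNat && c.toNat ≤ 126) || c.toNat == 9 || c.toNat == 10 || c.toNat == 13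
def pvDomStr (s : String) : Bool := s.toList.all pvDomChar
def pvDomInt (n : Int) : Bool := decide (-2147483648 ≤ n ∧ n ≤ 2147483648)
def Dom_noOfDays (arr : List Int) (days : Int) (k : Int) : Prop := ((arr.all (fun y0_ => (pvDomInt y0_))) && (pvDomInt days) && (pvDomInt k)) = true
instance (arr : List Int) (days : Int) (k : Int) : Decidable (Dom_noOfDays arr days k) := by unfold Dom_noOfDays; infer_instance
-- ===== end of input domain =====

-- B replaces A's flush-and-reset running counter with a segment-then-divide pass
-- (collect lengths of maximal blooming runs, then sum length//k); same cost ("alternative").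

-- ===== PORT A =====
-- the for-loop of A as structural recursion over (counter, total)
def noOfDaysLoop (l : List Int) (days : Int) (k : Int) (counter : Int) (total : Int) : Int :=
  match l with
  | [] => total + PySem.Int.floordiv counter k
  | i :: rest =>
    if i ≤ days then noOfDaysLoop rest days k (counter + 1) total
    else noOfDaysLoop rest days k 0 (total + PySem.Int.floordiv counter k)

def noOfDays (arr : List Int) (days : Int) (k : Int) : Int :=
  noOfDaysLoop arr days k 0 0

-- ===== PORT B =====
-- inner while loop of B: length of the leading run with x ≤ days, and the remaining list
def leRun (l : List Int) (days : Int) : Int × List Int :=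
  match l with
  | [] => (0, [])
  | i :: rest =>
    if i ≤ days then ((leRun rest days).1 + 1, (leRun rest days).2)
    else (0, i :: rest)

theorem leRun_snd_length (l : List Int) (days : Int) :
    (leRun l days).2.length ≤ l.length := by
  induction l with
  | nil => simp [leRun]
  | cons i rest ih =>
    simp only [leRun]
    split
    · exact Nat.le_trans ih (Nat.le_succ _)
    · exact Nat.le_refl _

-- outer while loop of B: the lengths of the maximal blooming runs (`runs` in Source B)
def bloomLens (l : List Int) (days : Int) : List Int :=
  match h : l with
  | [] => []
  | i :: rest =>
    if i ≤ days then (leRun l days).1 :: bloomLens (leRun l days).2 days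
    else bloomLens rest days
  termination_by l.length
  decreasing_by
  · subst h
    simp only [leRun, if_pos ‹_›]
    exact Nat.lt_succ_of_le (leRun_snd_length rest days)
  · simp

def noOfDays_alt (arr : List Int) (days : Int) (k : Int) : Int :=
  (bloomLens arr days).foldl (fun acc r => acc + PySem.Int.floordiv r k) 0

-- ===== PRECONDITION & SPEC =====
-- Pre_ excludes k = 0, on which A always raises ZeroDivisionError (it divides the final counter by k unconditionally).
def Pre_noOfDays (arr : List Int) (days : Int) (k : Int) : Prop := k ≠ 0
instance (arr : List Int) (days : Int) (k : Int) : Decidable (Pre_noOfDays arr days k) := by unfold Pre_noOfDays; infer_instance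
def pvWitness_noOfDays : List Int × Int × Int := ([1, 5, 2, 2], 3, 2)

def Spec_noOfDays (arr : List Int) (days : Int) (k : Int) (out : Int) : Prop := out = noOfDays_alt arr days k
instance (arr : List Int) (days : Int) (k : Int) (out : Int) : Decidable (Spec_noOfDays arr days k out) := by unfold Spec_noOfDays; infer_instance

-- ===== CLAIM (what is proved, stated in full; the proofs are below) =====
def Claim_equal_noOfDays : Prop := ∀ (arr : List Int) (days : Int) (k : Int), Dom_noOfDays arr days k → Pre_noOfDays arr days k → Spec_noOfDays arr days k (noOfDays arr days k)

-- ===== LEMMAS AND PROOFS =====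

-- sum of r//k over the blooming-run lengths of l
def runSum (l : List Int) (days : Int) (k : Int) : Int :=
  ((bloomLens l days).map (fun r => PySem.Int.floordiv r k)).sum

theorem foldl_add_runSum (g : List Int) (k : Int) (acc : Int) :
    g.foldl (fun acc r => acc + PySem.Int.floordiv r k) acc
      = acc + (g.map (fun r => PySem.Int.floordiv r k)).sum := by
  induction g generalizing acc with
  | nil => simp
  | cons r rest ih => simp [List.foldl, ih, add_assoc]

theorem alt_eq_runSum (arr : List Int) (days k : Int) :
    noOfDays_alt arr days k = runSum arr days k := by
  simp [noOfDays_alt, runSum, foldl_add_runSum]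

theorem floordiv_zero_left (k : Int) : PySem.Int.floordiv 0 k = 0 := by
  simp [PySem.Int.floordiv]

theorem loop_total (l : List Int) (days k : Int) :
    ∀ c t, noOfDaysLoop l days k c t = t + noOfDaysLoop l days k c 0 := by
  induction l with
  | nil => intro c t; simp [noOfDaysLoop]
  | cons i rest ih =>
    intro c t
    simp only [noOfDaysLoop]
    split
    · rw [ih, ih (c + 1) 0]
    · rw [ih, ih 0 (0 + PySem.Int.floordiv c k)]
      ring

-- peeling one blooming run off runSum
theorem runSum_peel (l : List Int) (days k : Int) :
    runSum l days k
      = PySem.Int.floordiv (leRun l days).1 k + runSum (leRun l days).2 days k := by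
  match l with
  | [] => simp [runSum, bloomLens, leRun, floordiv_zero_left]
  | i :: rest =>
    by_cases h : i ≤ days
    · conv_lhs => rw [runSum, bloomLens]
      simp [h, runSum]
    · simp [leRun, h, floordiv_zero_left]

theorem loop_eq_runSum (l : List Int) (days k : Int) :
    ∀ c, noOfDaysLoop l days k c 0
      = PySem.Int.floordiv (c + (leRun l days).1) k + runSum (leRun l days).2 days k := by
  induction l with
  | nil => intro c; simp [noOfDaysLoop, leRun, runSum, bloomLens]
  | cons i rest ih =>
    intro c
    simp only [noOfDaysLoop, leRun]
    by_cases h : i ≤ days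
    · simp only [if_pos h]
      rw [ih (c + 1)]
      ring_nf
    · simp only [if_neg h]
      rw [loop_total, ih 0]
      have hpeel := runSum_peel rest days k
      have : runSum (i :: rest) days k = runSum rest days k := by
        conv_lhs => rw [runSum, bloomLens]
        simp [h, runSum]
      rw [this, hpeel]
      ring_nf

-- ===== VERDICT (by name: the statement is the Claim_ definition above) =====
theorem noOfDays_spec : Claim_equal_noOfDays := by
  intro arr days k _ _
  unfold Spec_noOfDays noOfDays
  rw [loop_eq_runSum arr days k 0, alt_eq_runSum]
  have := runSum_peel arr days k
  rw [this]
  ring_nf
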